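-- pv_equiv track=rewrite | github.com/keevin60907/EHOI---Efficient-Human-Object-Interaction-Detector | dimXGB.py | rm_redundant_bit
-- ===== SOURCE A (Python) =====
-- def rm_redundant_bit(codebook: dict):
--     codes = list(codebook.values())
--     bitID, partition = [], []
--     for i in range(len(codes[0])):
--         bitplane = ''.join([code[i] for code in codes])
--         if bitplane not in partition:
--             bitID.append(i)
--             partition.append(bitplane)
--     if len(bitID) == range(len(codes[0])):
--         return codebook
--     else:
--         new_codebook = {}
--         for key, values in codebook.items():
--             new_codebook[key] = ''.join([values[i] for i in bitID])
--         return new_codebook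
-- ===== SOURCE B (Python) =====
-- def rm_redundant_bit(codebook: dict):
--     codes = list(codebook.values())
--     L = len(codes[0])
--     cols = [''.join(t) for t in zip(*codes)]
--     order = sorted(range(L), key=lambda i: (cols[i], i))
--     kept = sorted(o for p, o in enumerate(order)
--                   if p == 0 or cols[o] != cols[order[p - 1]])
--     return {k: ''.join(v[i] for i in kept) for k, v in codebook.items()}
-- ===== Notes on version B (the rewrite author's own statement) =====
-- stated objective: alternative
-- what changed: A deduplicates bit-columns in one pass, maintaining a growing partition list and testing each new column for membership in it; B uses a sort-then-scan algorithm: it transposes the codes with zip, sorts the column indices by (column, index), extracts the head of each run of equal adjacent columns, and sorts those heads back into positional order - no seen-set or membership test is ever maintained.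
import Mathlib
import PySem

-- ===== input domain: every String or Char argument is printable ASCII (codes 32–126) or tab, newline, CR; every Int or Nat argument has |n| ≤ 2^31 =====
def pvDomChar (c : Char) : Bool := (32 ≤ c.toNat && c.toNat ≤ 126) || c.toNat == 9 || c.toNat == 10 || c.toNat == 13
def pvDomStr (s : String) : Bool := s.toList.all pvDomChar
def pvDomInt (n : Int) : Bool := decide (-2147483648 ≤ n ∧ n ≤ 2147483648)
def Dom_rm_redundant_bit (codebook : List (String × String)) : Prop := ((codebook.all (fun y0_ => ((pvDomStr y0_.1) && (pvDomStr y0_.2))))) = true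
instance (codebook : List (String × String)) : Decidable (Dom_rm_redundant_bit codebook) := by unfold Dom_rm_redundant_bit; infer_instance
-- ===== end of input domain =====

-- B replaces A's one-pass dedup (growing partition list + membership test) by sort-then-scan:
-- sort the column indices by (column, index), take the head of each run of equal columns, sort the heads (alternative algorithm).

-- ===== PORT A =====
def rm_redundant_bit (codebook : List (String × String)) : List (String × String) :=
  let d := PySem.Dict.ofList codebook
  let codes := d.values
  -- len(codes[0]): IndexError on an empty codebook — excluded by Pre_
  let n : Int := PySem.Str.len ((PySem.List.pyGet? codes 0).getD "")
  let st := (PySem.List.pyRange 0 n 1).foldl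
    (fun (st : List Int × List String) i =>
      -- code[i]: IndexError when some code is shorter than codes[0] — excluded by Pre_
      let bitplane := String.ofList (codes.map (fun code => (PySem.Str.pyGet? code i).getD ' '))
      if bitplane ∈ st.2 then st else (st.1 ++ [i], st.2 ++ [bitplane]))
    ([], [])
  let bitID := st.1
  -- `if len(bitID) == range(len(codes[0]))` compares an int with a range object: always False in Python 3,
  -- so A always takes the else branch and builds new_codebook
  let newd := d.items.foldl
    (fun (nd : PySem.Dict String String) kv =>
      nd.insert kv.1 (String.ofList (bitID.map (fun i => (PySem.Str.pyGet? kv.2 i).getD ' '))))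
    PySem.Dict.empty
  newd.items

-- ===== PORT B =====
-- zip(*rows): hand port, exact — columns truncated at the shortest row, [] when rows is empty
def pvCols (rows : List (List Char)) : List (List Char) :=
  if h : rows = [] ∨ ∃ r ∈ rows, r = [] then []
  else rows.map (fun r => r.headD ' ') :: pvCols (rows.map (fun r => r.tail))
termination_by (rows.headD []).length
decreasing_by
  push Not at h
  obtain ⟨h1, h2⟩ := h
  match rows, h1 with
  | r :: rs, _ =>
    have hr : r ≠ [] := h2 r (by simp)
    have hpos := List.length_pos_of_ne_nil hr
    simp
    omega

def rm_redundant_bit_alt (codebook : List (String × String)) : List (String × String) :=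
  let d := PySem.Dict.ofList codebook
  let codes := d.values
  -- Source B: L = len(codes[0]) — IndexError on an empty codebook, excluded by Pre_
  let L : Int := PySem.Str.len ((PySem.List.pyGet? codes 0).getD "")
  -- cols = [''.join(t) for t in zip(*codes)]
  let cols : List String := (pvCols (codes.map String.toList)).map String.ofList
  -- order = sorted(range(L), key=lambda i: (cols[i], i))  — cols[i]: IndexError outside Pre_
  let order := PySem.List.sorted2 (PySem.List.pyRange 0 L 1)
    (fun i => PySem.List.pyGetD cols i "") (fun i => i) false
  -- kept = sorted(o for p, o in enumerate(order) if p == 0 or cols[o] != cols[order[p-1]])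
  let heads := (order.zipIdx.filter
    (fun p => decide (p.2 = 0 ∨
      PySem.List.pyGetD cols p.1 "" ≠
      PySem.List.pyGetD cols (PySem.List.pyGetD order ((p.2 : Int) - 1) 0) ""))).map Prod.fst
  let kept := PySem.List.sorted heads (fun x => x) false
  -- {k: ''.join(v[i] for i in kept) for k, v in codebook.items()}
  ((d.items).foldl
    (fun (nd : PySem.Dict String String) kv =>
      nd.insert kv.1 (String.ofList (kept.map (fun i => (PySem.Str.pyGet? kv.2 i).getD ' '))))
    PySem.Dict.empty).items

-- ===== PRECONDITION & SPEC =====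
-- Pre_ excludes exactly the inputs on which the Python A raises IndexError: the empty codebook
-- (codes[0]) and codebooks in which some value is shorter than the first value (code[i]).
def Pre_rm_redundant_bit (codebook : List (String × String)) : Prop :=
  (PySem.Dict.ofList codebook).values ≠ [] ∧
  ∀ v ∈ (PySem.Dict.ofList codebook).values,
    PySem.Str.len (((PySem.Dict.ofList codebook).values).headD "") ≤ PySem.Str.len v
instance (codebook : List (String × String)) : Decidable (Pre_rm_redundant_bit codebook) := by
  unfold Pre_rm_redundant_bit; infer_instance

def pvWitness_rm_redundant_bit : (List (String × String)) := [("a", "001"), ("b", "010")]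

def Spec_rm_redundant_bit (codebook : List (String × String)) (out : List (String × String)) : Prop := out = rm_redundant_bit_alt codebook
instance (codebook : List (String × String)) (out : List (String × String)) : Decidable (Spec_rm_redundant_bit codebook out) := by unfold Spec_rm_redundant_bit; infer_instance

-- ===== CLAIM (what is proved, stated in full; the proofs are below) =====
def Claim_equal_rm_redundant_bit : Prop := ∀ (codebook : List (String × String)), Dom_rm_redundant_bit codebook → Pre_rm_redundant_bit codebook → Spec_rm_redundant_bit codebook (rm_redundant_bit codebook)

-- ===== LEMMAS AND PROOFS =====

theorem pv_getD_tail (c : List Char) (i : Nat) : c.tail.getD i ' ' = c.getD (i + 1) ' ' := by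
  cases c <;> simp

theorem pv_getD_zero (c : List Char) : c.headD ' ' = c.getD 0 ' ' := by
  cases c <;> simp

-- pvCols (= zip(*cs)) is the list of columns 0..n-1 when every row has length ≥ n and some row length n
theorem pvCols_eq (n : Nat) : ∀ (cs : List (List Char)), cs ≠ [] →
    (∀ c ∈ cs, n ≤ c.length) → (∃ c ∈ cs, c.length = n) →
    pvCols cs = (List.range n).map (fun i => cs.map (fun c => c.getD i ' ')) := by
  induction n with
  | zero =>
    intro cs _ _ hw
    obtain ⟨c, hc, hlen⟩ := hw
    rw [pvCols]
    rw [dif_pos (Or.inr ⟨c, hc, List.eq_nil_of_length_eq_zero hlen⟩)]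
    simp
  | succ n ih =>
    intro cs hne hall hw
    rw [pvCols]
    have hcond : ¬ (cs = [] ∨ ∃ r ∈ cs, r = []) := by
      push Not
      refine ⟨hne, fun r hr => ?_⟩
      have := hall r hr
      intro h0; rw [h0] at this; simp at this
    rw [dif_neg hcond]
    have hne' : cs.map (fun r => r.tail) ≠ [] := by simpa using hne
    have hall' : ∀ c ∈ cs.map (fun r => r.tail), n ≤ c.length := by
      intro c hc
      obtain ⟨r, hr, rfl⟩ := List.mem_map.mp hc
      have := hall r hr
      simp only [List.length_tail]
      omega
    have hw' : ∃ c ∈ cs.map (fun r => r.tail), c.length = n := by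
      obtain ⟨c, hc, hlen⟩ := hw
      exact ⟨c.tail, List.mem_map.mpr ⟨c, hc, rfl⟩, by simp [hlen]⟩
    rw [ih _ hne' hall' hw']
    rw [List.range_succ_eq_map]
    simp only [List.map_cons, List.map_map]
    congr 1
    · exact List.map_congr_left (fun c _ => pv_getD_zero c)
    · refine List.map_congr_left (fun i _ => ?_)
      simp only [Function.comp_apply]
      exact List.map_congr_left (fun c _ => pv_getD_tail c i)

-- A's dedup loop over a strictly increasing index list computes the first-occurrence filter
theorem pv_foldA (col : Int → String) (R : List Int) (hR : R.Pairwise (· < ·)) :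
    ∀ (l pre ids : List Int) (part : List String), R = pre ++ l →
    (∀ s, s ∈ part ↔ ∃ j ∈ pre, col j = s) →
    l.foldl (fun (st : List Int × List String) i =>
        if col i ∈ st.2 then st else (st.1 ++ [i], st.2 ++ [col i])) (ids, part)
      = (ids ++ l.filter (fun i => decide (∀ j ∈ R, j < i → col j ≠ col i)),
         part ++ (l.filter (fun i => decide (∀ j ∈ R, j < i → col j ≠ col i))).map col) := by
  intro l
  induction l with
  | nil => intro pre ids part _ _; simp
  | cons i l ih =>
    intro pre ids part hRe hpart
    -- {j ∈ R | j < i} = pre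
    have hsplit : ∀ j, (j ∈ R ∧ j < i) ↔ j ∈ pre := by
      intro j
      subst hRe
      have hp := List.pairwise_append.mp hR
      constructor
      · rintro ⟨hj, hlt⟩
        rcases List.mem_append.mp hj with h | h
        · exact h
        · rcases List.mem_cons.mp h with rfl | h
          · omega
          · have := (List.pairwise_cons.mp hp.2.1).1 j h
            omega
      · intro hj
        exact ⟨List.mem_append_left _ hj, hp.2.2 j hj i (List.mem_cons_self) ⟩
    have hmemiff : (col i ∈ part) ↔ ¬ (∀ j ∈ R, j < i → col j ≠ col i) := by
      rw [hpart]
      push Not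
      constructor
      · rintro ⟨j, hj, he⟩
        exact ⟨j, ((hsplit j).mpr hj).1, ((hsplit j).mpr hj).2, he⟩
      · rintro ⟨j, hj, hlt, he⟩
        exact ⟨j, (hsplit j).mp ⟨hj, hlt⟩, he⟩
    have hRe' : R = (pre ++ [i]) ++ l := by rw [hRe]; simp
    by_cases hmem : col i ∈ part
    · have hpred : (decide (∀ j ∈ R, j < i → col j ≠ col i)) = false := by
        simp only [decide_eq_false_iff_not]
        exact hmemiff.mp hmem
      have hpart' : ∀ s, s ∈ part ↔ ∃ j ∈ pre ++ [i], col j = s := by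
        intro s
        rw [hpart]
        constructor
        · rintro ⟨j, hj, he⟩; exact ⟨j, by simp [hj], he⟩
        · rintro ⟨j, hj, he⟩
          rcases List.mem_append.mp hj with h | h
          · exact ⟨j, h, he⟩
          · simp at h; subst h; exact (hpart s).mp (he ▸ hmem)
      rw [List.foldl_cons, if_pos hmem, List.filter_cons_of_neg (by simp [hpred]),
        ih (pre ++ [i]) ids part hRe' hpart']
    · have hpred : (decide (∀ j ∈ R, j < i → col j ≠ col i)) = true := by
        simp only [decide_eq_true_iff]
        by_contra hc
        exact hmem (hmemiff.mpr hc)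
      have hpart' : ∀ s, s ∈ part ++ [col i] ↔ ∃ j ∈ pre ++ [i], col j = s := by
        intro s
        constructor
        · intro hs
          rcases List.mem_append.mp hs with h | h
          · obtain ⟨j, hj, he⟩ := (hpart s).mp h
            exact ⟨j, by simp [hj], he⟩
          · simp at h
            exact ⟨i, by simp, h.symm⟩
        · rintro ⟨j, hj, he⟩
          rcases List.mem_append.mp hj with h | h
          · exact List.mem_append_left _ ((hpart s).mpr ⟨j, h, he⟩)
          · simp at h; subst h; simp [← he]
      rw [List.foldl_cons, if_neg hmem, List.filter_cons_of_pos (by simp [hpred]),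
        ih (pre ++ [i]) (ids ++ [i]) (part ++ [col i]) hRe' hpart']
      simp

-- run heads of the (column, index)-sorted index list are exactly the first occurrences
theorem pv_heads_mem (col : Int → String) (R ord : List Int)
    (hperm : ord.Perm R)
    (hlt : ord.Pairwise (fun a b => toLex (col a, a) < toLex (col b, b))) (i : Int) :
    (i ∈ (ord.zipIdx.filter
        (fun p => decide (p.2 = 0 ∨ col p.1 ≠ col (ord.getD (p.2 - 1) 0)))).map Prod.fst)
      ↔ (i ∈ R ∧ ∀ j ∈ R, j < i → col j ≠ col i) := by
  have hK := List.pairwise_iff_getElem.mp hlt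
  have hmono : ∀ a b : Int, toLex (col a, a) < toLex (col b, b) → col a ≤ col b := by
    intro a b h
    rcases Prod.Lex.lt_iff.mp h with h | ⟨h, _⟩
    · exact le_of_lt h
    · exact le_of_eq h
  constructor
  · intro hmem
    obtain ⟨p, hpf, rfl⟩ := List.mem_map.mp hmem
    obtain ⟨hpz, hc⟩ := List.mem_filter.mp hpf
    obtain ⟨q, x⟩ := p  -- zipIdx gives (element, index)
    obtain ⟨-, hxlen, hqx⟩ := List.mem_zipIdx hpz
    simp only [Nat.zero_add] at hxlen
    simp only [Nat.sub_zero] at hqx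
    have hxlen' : x < ord.length := hxlen
    rw [hqx] at hc ⊢
    refine ⟨hperm.mem_iff.mp (List.getElem_mem hxlen'), ?_⟩
    intro j hj hlt' he
    obtain ⟨r, hr, hrj⟩ := List.mem_iff_getElem.mp (hperm.mem_iff.mpr hj)
    rcases lt_trichotomy r x with hrx | hrx | hrx
    · -- j sits strictly before position x; then x ≥ 1 and the head condition is violated
      have hx1 : 1 ≤ x := by omega
      have hcd := decide_eq_true_iff.mp hc
      have hcol : col ord[x] ≠ col (ord.getD (x - 1) 0) := by
        rcases hcd with h0 | h0
        · omega
        · exact h0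
      rw [List.getD_eq_getElem ord 0 (by omega : x - 1 < ord.length)] at hcol
      have hKji : toLex (col j, j) < toLex (col ord[x], ord[x]) :=
        Prod.Lex.lt_iff.mpr (Or.inr ⟨he, hlt'⟩)
      have hKm : toLex (col ord[x-1], ord[x-1]) < toLex (col ord[x], ord[x]) :=
        hK (x-1) x (by omega) hxlen' (by omega)
      have hjm : col j ≤ col ord[x-1] := by
        rcases Nat.lt_or_ge r (x-1) with h | h
        · exact hmono _ _ (hrj ▸ hK r (x-1) hr (by omega) h)
        · have : r = x - 1 := by omega
          subst this
          rw [hrj]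
      have h1 : col ord[x-1] ≤ col ord[x] := hmono _ _ hKm
      have h2 : col ord[x] ≤ col ord[x-1] := by
        calc col ord[x] = col j := he.symm
          _ ≤ col ord[x-1] := hjm
      exact hcol (le_antisymm h1 h2).symm
    · subst hrx
      rw [hrj] at hlt'
      omega
    · have h1 := hK x r hxlen' hr hrx
      rw [hrj] at h1
      have h2 : toLex (col j, j) < toLex (col ord[x], ord[x]) :=
        Prod.Lex.lt_iff.mpr (Or.inr ⟨he, hlt'⟩)
      exact absurd h1 (lt_asymm h2)
  · rintro ⟨hiR, hfo⟩
    obtain ⟨p, hp, hpi⟩ := List.mem_iff_getElem.mp (hperm.mem_iff.mpr hiR)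
    refine List.mem_map.mpr ⟨(i, p), List.mem_filter.mpr ⟨?_, ?_⟩, rfl⟩
    · rw [List.mem_iff_getElem]
      exact ⟨p, by simpa using hp, by rw [List.getElem_zipIdx]; simp [hpi]⟩
    · rw [decide_eq_true_iff]
      rcases Nat.eq_zero_or_pos p with h0 | h0
      · exact Or.inl h0
      · refine Or.inr ?_
        rw [List.getD_eq_getElem ord 0 (by omega : p - 1 < ord.length)]
        intro hceq
        have hKm : toLex (col ord[p-1], ord[p-1]) < toLex (col i, i) := by
          have := hK (p-1) p (by omega) hp (by omega)
          rwa [hpi] at this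
        have hmi : ord[p-1] < i := by
          rcases Prod.Lex.lt_iff.mp hKm with h | ⟨_, h⟩
          · rw [hceq] at h; exact absurd h (lt_irrefl _)
          · exact h
        exact hfo ord[p-1] (hperm.mem_iff.mp (List.getElem_mem (by omega))) hmi hceq.symm

-- sorted2 with an index tiebreaker is insertion sort with the lexicographic key
theorem pv_sorted2_lex (xs : List Int) (k1 : Int → String) (K : Int → Lex (String × Int))
    (hKd : ∀ i, K i = toLex (k1 i, i)) :
    PySem.List.sorted2 xs k1 (fun i => i) false = PySem.List.sorted xs K false := by
  have hcomp : (fun a b : Int => decide (k1 a < k1 b) || (!decide (k1 b < k1 a) && decide (a < b)))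
      = fun a b => decide (K a < K b) := by
    funext a b
    rw [hKd a, hKd b]
    have h : (k1 a < k1 b ∨ ¬ k1 b < k1 a ∧ a < b) ↔ toLex (k1 a, a) < toLex (k1 b, b) := by
      rw [Prod.Lex.lt_iff]
      constructor
      · rintro (h | ⟨h1, h2⟩)
        · exact Or.inl h
        · rcases lt_trichotomy (k1 a) (k1 b) with h3 | h3 | h3
          · exact Or.inl h3
          · exact Or.inr ⟨h3, h2⟩
          · exact absurd h3 h1
      · rintro (h | ⟨h1, h2⟩)
        · exact Or.inl h
        · exact Or.inr ⟨fun hc => absurd h1.symm (ne_of_lt hc), h2⟩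
    by_cases hc : toLex (k1 a, a) < toLex (k1 b, b)
    · rcases h.mpr hc with h1 | ⟨h1, h2⟩
      · simp [hc, h1]
      · simp [hc, h1, h2]
    · have hthis := h.not.mpr hc
      push Not at hthis
      obtain ⟨h1, h2⟩ := hthis
      have hnl : ¬ k1 a < k1 b := not_lt.mpr h1
      by_cases h3 : k1 b < k1 a
      · simp [hc, hnl, h3]
      · simp [hc, hnl, h3, not_lt.mpr (h2 (not_lt.mp h3))]
  simp only [PySem.List.sorted2, PySem.List.sorted, Bool.false_eq_true, if_false, hcomp]

-- ===== VERDICT (by name: the statement is the Claim_ definition above) =====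
theorem rm_redundant_bit_spec : Claim_equal_rm_redundant_bit := by
  intro cb _hdom hpre
  unfold Spec_rm_redundant_bit
  obtain ⟨hne, hlenpre⟩ := hpre
  obtain ⟨h, t, hht⟩ := List.exists_cons_of_ne_nil hne
  simp only [rm_redundant_bit, rm_redundant_bit_alt]
  set codes := (PySem.Dict.ofList cb).values with hcodes
  set codesL := codes.map String.toList with hcodesL
  set Lh := h.toList.length with hLh
  set colF : Int → String := fun i => String.ofList (codesL.map (fun c => c.getD i.toNat ' ')) with hcolF
  set R : List Int := (List.range Lh).map (fun k : Nat => (k : Int)) with hR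
  have hlen' : ∀ v ∈ codes, Lh ≤ v.toList.length := by
    intro v hv
    have := hlenpre v hv
    rw [hht] at this
    simp only [List.headD_cons, PySem.Str.len_eq] at this
    exact_mod_cast this
  have hn : PySem.Str.len ((PySem.List.pyGet? codes 0).getD "") = (Lh : Int) := by
    have hh0 : (PySem.List.pyGet? codes 0).getD "" = h := by
      rw [hht]; simp [PySem.List.pyGet?, PySem.List.pyIdx?]
    rw [hh0, PySem.Str.len_eq, hLh]
  have hrangeR : PySem.List.pyRange 0 (Lh : Int) 1 = R := PySem.List.pyRange_zero_nat _
  have hRpair : R.Pairwise (· < ·) := by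
    rw [hR]
    exact List.pairwise_map.mpr (List.pairwise_lt_range.imp (by intro a b hab; exact_mod_cast hab))
  have hRnodup : R.Nodup := hRpair.imp (fun hab => ne_of_lt hab)
  -- A's loop body computes colF on every index of R
  have hbody : ∀ (st : List Int × List String) i, i ∈ R →
      (if String.ofList (codes.map (fun code => (PySem.Str.pyGet? code i).getD ' ')) ∈ st.2 then st
       else (st.1 ++ [i], st.2 ++ [String.ofList (codes.map (fun code => (PySem.Str.pyGet? code i).getD ' '))]))
      = (if colF i ∈ st.2 then st else (st.1 ++ [i], st.2 ++ [colF i])) := by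
    intro st i hi
    rw [hR] at hi
    obtain ⟨k, _hk, rfl⟩ := List.mem_map.mp hi
    have hcol : codes.map (fun code => (PySem.Str.pyGet? code (k : Int)).getD ' ')
        = codesL.map (fun c => c.getD ((k : Int)).toNat ' ') := by
      rw [hcodesL, List.map_map]
      refine List.map_congr_left (fun code _ => ?_)
      simp [Int.toNat_natCast, List.getD_eq_getElem?_getD]
    rw [show colF (k : Int) = String.ofList (codesL.map (fun c => c.getD ((k : Int)).toNat ' ')) from rfl, hcol]
  -- the transposed column list
  have hcols : pvCols codesL = (List.range Lh).map (fun k => codesL.map (fun c => c.getD k ' ')) := by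
    refine pvCols_eq Lh codesL ?_ ?_ ?_
    · rw [hcodesL, hht]; simp
    · intro c hc
      obtain ⟨v, hv, rfl⟩ := List.mem_map.mp hc
      exact hlen' v hv
    · exact ⟨h.toList, List.mem_map.mpr ⟨h, by rw [hht]; simp, rfl⟩, rfl⟩
  set colsT := (pvCols codesL).map String.ofList with hcolsT
  have hcolsR : colsT = R.map colF := by
    rw [hcolsT, hcols, hR, List.map_map, List.map_map]
    refine List.map_congr_left (fun k _ => ?_)
    simp [hcolF, Int.toNat_natCast]
  have hcolslen : colsT.length = Lh := by rw [hcolsR, hR]; simp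
  have hkey : ∀ i ∈ R, PySem.List.pyGetD colsT i "" = colF i := by
    intro i hi
    rw [hR] at hi
    obtain ⟨k, hk, rfl⟩ := List.mem_map.mp hi
    have hk' : k < Lh := List.mem_range.mp hk
    rw [PySem.List.pyGetD_natCast, hcolsR, hR, List.map_map]
    simp [List.getD_eq_getElem?_getD, hk']
  -- name the sorted order and derive its properties
  set K' : Int → Lex (String × Int) := fun i => toLex (PySem.List.pyGetD colsT i "", i) with hK'
  rw [hn, hrangeR, pv_sorted2_lex R (fun i => PySem.List.pyGetD colsT i "") K' (fun i => rfl)]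
  set ord := PySem.List.sorted R K' false with hord
  have hperm : ord.Perm R := PySem.List.sorted_perm R K' false
  have hple : ord.Pairwise (fun a b => K' a ≤ K' b) := PySem.List.sorted_pairwise R K'
  have hordnodup : ord.Nodup := hperm.nodup_iff.mpr hRnodup
  have hplt' : ord.Pairwise (fun a b => K' a < K' b) := by
    refine (hple.and hordnodup).imp ?_
    rintro a b ⟨hle, hne⟩
    refine lt_of_le_of_ne hle (fun hEq => hne ?_)
    have := congrArg (fun x => (ofLex x).2) hEq
    simpa [hK'] using this
  have hplt : ord.Pairwise (fun a b => toLex (colF a, a) < toLex (colF b, b)) := by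
    refine hplt'.imp_of_mem ?_
    intro a b ha hb hab
    rw [hK'] at hab
    simp only at hab
    rwa [hkey a (hperm.subset ha), hkey b (hperm.subset hb)] at hab
  -- the run-head filter, rewritten to the canonical condition
  have hfc : ord.zipIdx.filter
        (fun p => decide (p.2 = 0 ∨
          PySem.List.pyGetD colsT p.1 "" ≠
          PySem.List.pyGetD colsT (PySem.List.pyGetD ord ((p.2 : Int) - 1) 0) ""))
      = ord.zipIdx.filter
        (fun p => decide (p.2 = 0 ∨ colF p.1 ≠ colF (ord.getD (p.2 - 1) 0))) := by
    refine List.filter_congr ?_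
    rintro ⟨x, q⟩ hp
    obtain ⟨-, hql, hx⟩ := List.mem_zipIdx hp
    simp only [Nat.zero_add] at hql
    simp only [Nat.sub_zero] at hx
    rcases Nat.eq_zero_or_pos q with h0 | h0
    · simp [h0]
    · have hcast : (q : Int) - 1 = ((q - 1 : Nat) : Int) := by omega
      have hq1 : q - 1 < ord.length := by omega
      have hmem1 : ord.getD (q - 1) 0 ∈ R := by
        rw [List.getD_eq_getElem ord 0 hq1]
        exact hperm.subset (List.getElem_mem hq1)
      have hmemx : x ∈ R := by
        rw [hx]; exact hperm.subset (List.getElem_mem (by omega))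
      rw [hcast, PySem.List.pyGetD_natCast, List.getD_eq_getElem ord 0 hq1]
      rw [List.getD_eq_getElem ord 0 hq1] at hmem1
      simp only
      rw [hkey x hmemx, hkey _ hmem1]
  rw [hfc]
  -- the first-occurrence filter
  set F := R.filter (fun i => decide (∀ j ∈ R, j < i → colF j ≠ colF i)) with hF
  have hFnodup : F.Nodup := hRnodup.filter _
  have hFpair : F.Pairwise (· < ·) := hRpair.filter _
  set heads := (ord.zipIdx.filter
    (fun p => decide (p.2 = 0 ∨ colF p.1 ≠ colF (ord.getD (p.2 - 1) 0)))).map Prod.fst with hheads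
  have hheadssub : heads.Sublist ord := by
    rw [hheads]
    conv_rhs => rw [← List.zipIdx_map_fst 0 ord]
    exact List.filter_sublist.map _
  have hheadsnodup : heads.Nodup := hheadssub.nodup hordnodup
  have hpermHF : F.Perm heads := by
    rw [List.perm_ext_iff_of_nodup hFnodup hheadsnodup]
    intro a
    rw [hheads, pv_heads_mem colF R ord hperm hplt a, hF, List.mem_filter]
    simp
  have hkept : PySem.List.sorted heads (fun x => x) false = F :=
    PySem.List.sorted_eq_of_perm_of_pairwise_lt heads F (fun x => x) hpermHF hFpair
  rw [hkept]
  -- A's loop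
  rw [PySem.List.foldl_congr_mem _ _ _ _ hbody,
    pv_foldA colF R hRpair R [] [] [] (by simp) (by simp)]
  simp only [List.nil_append, hF]
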